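-- pv_equiv track=rewrite | github.com/ydeonia/vedaSchoolPro | utils/subdomain.py | extract_subdomain
-- ===== SOURCE A (Python) =====
-- RESERVED_SUBDOMAINS = {"www", "app", "api", "admin", "mail", "ftp", "static", "cdn", "docs", "help", "support", "status"}
--
-- BASE_DOMAINS = {"vedaschoolpro.com", "vedaflow.in"}
--
-- def extract_subdomain(host: str) -> str | None:
--     """
--     Extract school subdomain from Host header.
--     Returns None if no subdomain or if it's reserved.
--
--     Examples:
--       "goenkajammu.vedaschoolpro.com" → "goenkajammu"
--       "app.vedaschoolpro.com" → None (reserved)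
--       "localhost:8000" → None (dev)
--       "vedaschoolpro.com" → None (bare domain)
--       "192.168.1.5:8000" → None (IP)
--     """
--     if not host:
--         return None
--
--     # Strip port
--     hostname = host.split(":")[0].lower().strip()
--
--     # Skip IPs and localhost
--     if hostname in ("localhost", "127.0.0.1", "0.0.0.0") or hostname.replace(".", "").isdigit():
--         return None
--
--     # Check against known base domains
--     for base in BASE_DOMAINS:
--         if hostname.endswith("." + base):
--             # Extract the subdomain part
--             sub = hostname[: -(len(base) + 1)]  # everything before ".vedaschoolpro.com"
--             # Handle nested subdomains — take the leftmost part
--             sub = sub.split(".")[0] if "." in sub else sub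
--             if sub and sub not in RESERVED_SUBDOMAINS:
--                 return sub
--             return None
--
--     return None
-- ===== SOURCE B (Python) =====
-- RESERVED_SUBDOMAINS = {"www", "app", "api", "admin", "mail", "ftp", "static", "cdn", "docs", "help", "support", "status"}
--
-- BASE_DOMAINS = {"vedaschoolpro.com", "vedaflow.in"}
--
-- def extract_subdomain(host):
--     """Tokenize the hostname once and use the base-domain set as a direct
--     lookup table on the trailing labels, instead of per-base endswith/slice."""
--     if not host:
--         return None
--     hostname = host.split(":")[0].lower().strip()
--     if hostname in ("localhost", "127.0.0.1", "0.0.0.0") or hostname.replace(".", "").isdigit():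
--         return None
--     labels = hostname.split(".")
--     if len(labels) >= 3 and ".".join(labels[-2:]) in BASE_DOMAINS:
--         sub = labels[0]
--         if sub and sub not in RESERVED_SUBDOMAINS:
--             return sub
--     return None
-- ===== Notes on version B (the rewrite author's own statement) =====
-- stated objective: simpler
-- what changed: B tokenizes the hostname into its dot-separated labels once and looks the rejoined trailing two labels up directly in the BASE_DOMAINS set, replacing A's per-base endswith test, negative-length slice and conditional re-split of the subdomain part.
import Mathlib
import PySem

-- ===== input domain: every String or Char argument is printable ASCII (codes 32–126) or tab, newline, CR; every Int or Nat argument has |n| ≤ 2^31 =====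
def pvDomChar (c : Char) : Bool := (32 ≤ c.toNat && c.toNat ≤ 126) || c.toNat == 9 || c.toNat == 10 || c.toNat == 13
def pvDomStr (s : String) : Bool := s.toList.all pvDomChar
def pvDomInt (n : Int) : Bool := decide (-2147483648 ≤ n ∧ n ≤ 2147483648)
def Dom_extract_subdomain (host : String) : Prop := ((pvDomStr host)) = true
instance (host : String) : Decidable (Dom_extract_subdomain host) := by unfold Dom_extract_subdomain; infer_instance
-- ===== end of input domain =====

-- B tokenizes the hostname into its labels once and looks the trailing two labels up in the
-- base-domain set, instead of A's per-base endswith/slice loop; objective: simpler.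

-- Shared module constants and the pre-processing lines (port-strip, lowercase, IP/localhost
-- guard) that are textually identical in both Python sources.
def pvReserved : PySem.Set (List Char) :=
  PySem.Set.ofList (List.map String.toList
    ["www", "app", "api", "admin", "mail", "ftp", "static", "cdn", "docs", "help", "support", "status"])

-- hostname = host.split(":")[0].lower().strip()
def pvHostname (host : String) : List Char :=
  PySem.Chars.strip (PySem.Chars.lower ((PySem.Chars.splitOn host.toList [':']).headD []))

-- hostname in ("localhost","127.0.0.1","0.0.0.0") or hostname.replace(".","").isdigit()
def pvGuard (hostname : List Char) : Bool :=
  hostname == "localhost".toList || hostname == "127.0.0.1".toList || hostname == "0.0.0.0".toList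
    || PySem.Chars.strIsdigit (PySem.Chars.replace hostname ['.'] [])

-- ===== PORT A =====
-- A iterates over the set BASE_DOMAINS; ported as a list (the result does not depend on the
-- iteration order: no hostname ends with both "."+base suffixes).
def pvBaseListA : List (List Char) := List.map String.toList ["vedaschoolpro.com", "vedaflow.in"]

-- for base in BASE_DOMAINS: if hostname.endswith("." + base): …
def pvLoopA (hostname : List Char) : List (List Char) → Option (List Char)
  | [] => none
  | base :: rest =>
      if PySem.Chars.endswith hostname ('.' :: base) then
        let sub0 := PySem.Chars.slice hostname none (some (-(PySem.Chars.len base + 1)))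
        let sub := if PySem.Chars.isIn ['.'] sub0 then (PySem.Chars.splitOn sub0 ['.']).headD [] else sub0
        if sub ≠ [] ∧ sub ∉ pvReserved then some sub else none
      else pvLoopA hostname rest

def extract_subdomain (host : String) : Option String :=
  if host.toList = [] then none
  else
    let hostname := pvHostname host
    if pvGuard hostname then none
    else Option.map String.ofList (pvLoopA hostname pvBaseListA)

-- ===== PORT B =====
def pvBasesB : PySem.Set (List Char) :=
  PySem.Set.ofList (List.map String.toList ["vedaschoolpro.com", "vedaflow.in"])

-- labels = hostname.split("."); len(labels) >= 3 and ".".join(labels[-2:]) in BASE_DOMAINS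
def pvTailB (hostname : List Char) : Option (List Char) :=
  let labels := PySem.Chars.splitOn hostname ['.']
  if 3 ≤ labels.length ∧
      PySem.Chars.join ['.'] (PySem.List.slice labels (some (-2)) none) ∈ pvBasesB then
    let sub := labels.headD []
    if sub ≠ [] ∧ sub ∉ pvReserved then some sub else none
  else none

def extract_subdomain_alt (host : String) : Option String :=
  if host.toList = [] then none
  else
    let hostname := pvHostname host
    if pvGuard hostname then none
    else Option.map String.ofList (pvTailB hostname)

-- ===== PRECONDITION & SPEC =====
def Spec_extract_subdomain (host : String) (out : Option String) : Prop := out = extract_subdomain_alt host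
instance (host : String) (out : Option String) : Decidable (Spec_extract_subdomain host out) := by unfold Spec_extract_subdomain; infer_instance

-- ===== CLAIM (what is proved, stated in full; the proofs are below) =====
def Claim_equal_extract_subdomain : Prop := ∀ (host : String), Dom_extract_subdomain host → Spec_extract_subdomain host (extract_subdomain host)

-- ===== LEMMAS AND PROOFS =====

theorem pv_go_single (c : Char) : ∀ (fuel : Nat) (l cur acc : _), l.length < fuel →
    PySem.Chars.splitOn.go [c] fuel l cur acc
      = acc.reverse ++ (l.splitOn c).modifyHead (cur.reverse ++ ·) := by
  intro fuel
  induction fuel with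
  | zero => intro l cur acc h; omega
  | succ fuel ih =>
    intro l cur acc h
    cases l with
    | nil =>
      rw [PySem.Chars.splitOn.go.eq_def]
      simp [List.splitOn, List.splitOnP_nil]
    | cons d rest =>
      rw [PySem.Chars.splitOn.go.eq_def]
      simp only []
      by_cases hc : d = c
      · subst hc
        have hpre : List.isPrefixOf [d] (d :: rest) = true := by simp [List.isPrefixOf]
        rw [if_pos hpre]
        rw [ih _ _ _ (by simpa using Nat.lt_of_succ_lt_succ h)]
        simp [List.splitOn, List.splitOnP_cons]
        cases List.splitOnP (fun x => x == d) rest <;> simp [List.modifyHead]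
      · have hpre : List.isPrefixOf [c] (d :: rest) = false := by
          simp [List.isPrefixOf]
          exact fun h => hc h.symm
        rw [if_neg (by simp [hpre])]
        rw [ih _ _ _ (by simpa using Nat.lt_of_succ_lt_succ h)]
        have hne := List.splitOnP_ne_nil (fun x => x == c) rest
        obtain ⟨p, ps, hp⟩ : ∃ p ps, rest.splitOn c = p :: ps := by
          cases hrp : rest.splitOn c with
          | nil => exact absurd hrp hne
          | cons p ps => exact ⟨p, ps, rfl⟩
        simp [List.splitOn, List.splitOnP_cons, hc] at *
        simp [hp, List.modifyHead]

theorem pv_splitOn_single (s : List Char) (c : Char) :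
    PySem.Chars.splitOn s [c] = s.splitOn c := by
  rw [PySem.Chars.splitOn]
  rw [pv_go_single c (s.length + 1) s [] [] (by omega)]
  cases h : s.splitOn c <;> simp [List.modifyHead]

theorem pv_splitOn_nodot (ys : List Char) (h : '.' ∉ ys) : ys.splitOn '.' = [ys] := by
  rw [List.splitOn]
  refine List.splitOnP_eq_single _ _ ?_
  intro x hx
  simp only [beq_iff_eq]
  exact fun he => h (he ▸ hx)

theorem pv_splitOn_suffix (sub b1 b2 : List Char) (h1 : '.' ∉ b1) (h2 : '.' ∉ b2) :
    (sub ++ '.' :: (b1 ++ '.' :: b2)).splitOn '.' = sub.splitOn '.' ++ [b1, b2] := by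
  rw [List.splitOn, List.splitOnP_append_cons _ _ _ _ (by simp),
      List.splitOnP_append_cons _ _ _ _ (by simp)]
  rw [← List.splitOn, ← List.splitOn, ← List.splitOn]
  rw [pv_splitOn_nodot b1 h1, pv_splitOn_nodot b2 h2]
  simp

theorem pv_join_append (l1 l2 : List (List Char)) (h1 : l1 ≠ []) (h2 : l2 ≠ []) :
    PySem.Chars.join ['.'] (l1 ++ l2)
      = PySem.Chars.join ['.'] l1 ++ '.' :: PySem.Chars.join ['.'] l2 := by
  induction l1 with
  | nil => exact absurd rfl h1
  | cons x l1' ih =>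
    cases l1' with
    | nil =>
      cases l2 with
      | nil => exact absurd rfl h2
      | cons y l2' => simp [PySem.Chars.join_cons_cons, PySem.Chars.join_singleton]
    | cons x2 l1'' =>
      have := ih (by simp)
      simp only [List.cons_append, PySem.Chars.join_cons_cons] at *
      simp [this]

theorem pv_mem_of_not_infix (sub0 : List Char) (h : ¬ ['.'] <:+: sub0) : '.' ∉ sub0 := by
  intro hm
  obtain ⟨l1, l2, rfl⟩ := List.append_of_mem hm
  exact h ⟨l1, l2, by simp⟩

theorem pv_subA_eq (sub0 : List Char) :
    (if PySem.Chars.isIn ['.'] sub0 then (PySem.Chars.splitOn sub0 ['.']).headD [] else sub0)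
      = (sub0.splitOn '.').headD [] := by
  by_cases h : PySem.Chars.isIn ['.'] sub0 = true
  · rw [if_pos h, pv_splitOn_single]
  · rw [if_neg h]
    rw [pv_splitOn_nodot sub0 (pv_mem_of_not_infix sub0
      ((PySem.Chars.isIn_eq_false_iff _ _).mp (by simpa using h)))]
    rfl

theorem pv_slice_last_two {α : Type} (ls : List α) :
    PySem.List.slice ls (some (-2)) none = ls.drop (ls.length - 2) := by
  rw [PySem.List.slice_from_neg_ofNat ls 2 (by omega)]

theorem pv_exists_last_two {α : Type} (ls : List α) (h : 2 ≤ ls.length) :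
    ∃ init x y, ls = init ++ [x, y] := by
  rcases hr : ls.reverse with _ | ⟨y, _ | ⟨x, rest⟩⟩
  · simp [List.reverse_eq_nil_iff.mp hr] at h
  · have := congrArg List.reverse hr; simp at this; simp [this] at h
  · exact ⟨rest.reverse, x, y, by
      have := congrArg List.reverse hr; simpa using this⟩

-- endswith from the label characterisation

theorem pv_ends_of_labels (hs b : List Char) (hlen : 3 ≤ (hs.splitOn '.').length)
    (hj : PySem.Chars.join ['.'] (PySem.List.slice (hs.splitOn '.') (some (-2)) none) = b) :
    PySem.Chars.endswith hs ('.' :: b) = true := by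
  obtain ⟨init, x, y, hls⟩ := pv_exists_last_two (hs.splitOn '.') (by omega)
  have hinit : init ≠ [] := by
    intro h0; rw [hls, h0] at hlen; simp at hlen
  rw [pv_slice_last_two, hls] at hj
  have hdrop : (init ++ [x, y]).drop ((init ++ [x, y]).length - 2) = [x, y] := by
    have : (init ++ [x, y]).length - 2 = init.length := by simp
    rw [this, List.drop_left]
  rw [hdrop] at hj
  have hjxy : PySem.Chars.join ['.'] [x, y] = x ++ '.' :: y := by
    rw [PySem.Chars.join_cons_cons]
    simp [PySem.Chars.join_singleton]
  have hhs : hs = PySem.Chars.join ['.'] init ++ '.' :: (x ++ '.' :: y) :=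
    calc hs = ['.'].intercalate (hs.splitOn '.') := (List.intercalate_splitOn hs '.').symm
      _ = PySem.Chars.join ['.'] (init ++ [x, y]) := by
            rw [hls, PySem.Chars.join.eq_1]
      _ = PySem.Chars.join ['.'] init ++ '.' :: (x ++ '.' :: y) := by
            rw [pv_join_append init [x, y] hinit (by simp), hjxy]
  rw [PySem.Chars.endswith_iff, hhs, ← hjxy, hj]
  exact ⟨_, rfl⟩

theorem pv_hit (hs b1 b2 : List Char) (h1 : '.' ∉ b1) (h2 : '.' ∉ b2)
    (hmem : (b1 ++ '.' :: b2) ∈ pvBasesB)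
    (he : PySem.Chars.endswith hs ('.' :: (b1 ++ '.' :: b2)) = true) :
    (let sub0 := PySem.Chars.slice hs none (some (-(PySem.Chars.len (b1 ++ '.' :: b2) + 1)))
     let sub := if PySem.Chars.isIn ['.'] sub0 then (PySem.Chars.splitOn sub0 ['.']).headD [] else sub0
     if sub ≠ [] ∧ sub ∉ pvReserved then some sub else none) = pvTailB hs := by
  obtain ⟨sub, hsub⟩ := (PySem.Chars.endswith_iff _ _).mp he
  -- A's slice recovers exactly `sub`
  have hslice : PySem.Chars.slice hs none (some (-(PySem.Chars.len (b1 ++ '.' :: b2) + 1))) = sub := by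
    rw [PySem.Chars.slice_eq_listSlice, PySem.Chars.len_eq]
    have hcast : -((((b1 ++ '.' :: b2)).length : Int) + 1) = -(((b1 ++ '.' :: b2).length + 1 : Nat) : Int) := by
      push_cast; ring
    rw [hcast, PySem.List.slice_to_neg_natCast hs _ (by omega)]
    have hlen' : hs.length - ((b1 ++ '.' :: b2).length + 1) = sub.length := by
      rw [← hsub]; simp
    rw [hlen', ← hsub, List.take_left]
  have hsplit : hs.splitOn '.' = sub.splitOn '.' ++ [b1, b2] := by
    rw [← hsub]; exact pv_splitOn_suffix sub b1 b2 h1 h2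
  obtain ⟨p, ps, hp⟩ : ∃ p ps, sub.splitOn '.' = p :: ps := by
    cases hq : sub.splitOn '.' with
    | nil => exact absurd hq (by rw [List.splitOn]; exact List.splitOnP_ne_nil _ _)
    | cons p ps => exact ⟨p, ps, rfl⟩
  have hL : 3 ≤ (List.splitOn '.' sub ++ [b1, b2]).length := by rw [hp]; simp
  have hLl : (List.splitOn '.' sub ++ [b1, b2]).length - 2 = (List.splitOn '.' sub).length := by simp
  have hdropj : PySem.Chars.join ['.']
      (PySem.List.slice (List.splitOn '.' sub ++ [b1, b2]) (some (-2)) none) = b1 ++ '.' :: b2 := by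
    rw [pv_slice_last_two, hLl, List.drop_left, PySem.Chars.join_cons_cons]
    simp [PySem.Chars.join_singleton]
  have hhead : (List.splitOn '.' sub ++ [b1, b2]).headD [] = (List.splitOn '.' sub).headD [] := by
    rw [hp]; rfl
  simp only [hslice, pv_subA_eq]
  unfold pvTailB
  simp only [pv_splitOn_single, hsplit]
  have hcond : 3 ≤ (List.splitOn '.' sub ++ [b1, b2]).length ∧
      PySem.Chars.join ['.']
        (PySem.List.slice (List.splitOn '.' sub ++ [b1, b2]) (some (-2)) none) ∈ pvBasesB :=
    ⟨hL, by rw [hdropj]; exact hmem⟩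
  rw [if_pos hcond, hhead]

theorem pv_miss (hs : List Char)
    (e1 : ¬ PySem.Chars.endswith hs ('.' :: "vedaschoolpro.com".toList) = true)
    (e2 : ¬ PySem.Chars.endswith hs ('.' :: "vedaflow.in".toList) = true) :
    pvTailB hs = none := by
  unfold pvTailB
  simp only [pv_splitOn_single]
  rw [if_neg]
  rintro ⟨hlen, hmem⟩
  have hmem' := (PySem.Set.mem_ofList _ _).mp hmem
  simp only [List.map_cons, List.map_nil] at hmem'
  rcases List.mem_cons.mp hmem' with h | hmem2
  · exact e1 (by rw [← h]; exact pv_ends_of_labels hs _ hlen rfl)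
  rcases List.mem_cons.mp hmem2 with h | hnil
  · exact e2 (by rw [← h]; exact pv_ends_of_labels hs _ hlen rfl)
  · exact absurd hnil (List.not_mem_nil)

theorem pv_tail_eq (hs : List Char) : pvLoopA hs pvBaseListA = pvTailB hs := by
  have hd1 : ("vedaschoolpro.com".toList) = "vedaschoolpro".toList ++ '.' :: "com".toList := by decide
  have hd2 : ("vedaflow.in".toList) = "vedaflow".toList ++ '.' :: "in".toList := by decide
  simp only [pvLoopA, pvBaseListA, List.map]
  by_cases e1 : PySem.Chars.endswith hs ('.' :: "vedaschoolpro.com".toList) = true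
  · rw [hd1] at e1 ⊢
    rw [if_pos e1]
    exact pv_hit hs _ _ (by decide) (by decide) (by decide) e1
  · rw [if_neg e1]
    by_cases e2 : PySem.Chars.endswith hs ('.' :: "vedaflow.in".toList) = true
    · rw [hd2] at e2 ⊢
      rw [if_pos e2]
      exact pv_hit hs _ _ (by decide) (by decide) (by decide) e2
    · rw [if_neg e2]
      exact (pv_miss hs e1 e2).symm

-- ===== VERDICT (by name: the statement is the Claim_ definition above) =====
theorem extract_subdomain_spec : Claim_equal_extract_subdomain := by
  intro host _
  unfold Spec_extract_subdomain extract_subdomain extract_subdomain_alt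
  simp only [pv_tail_eq]
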